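-- pv_equiv track=rewrite | github.com/rig0/desktop-agent | modules/utils/formatting.py | sanitize_topic
-- ===== SOURCE A (Python) =====
-- def sanitize_topic(name: str) -> str:
--     """Sanitize a string for use in MQTT topics.
--
--     Replaces spaces and special characters with underscores, converts
--     to lowercase, and removes problematic characters for MQTT topics.
--
--     Args:
--         name: String to sanitize.
--
--     Returns:
--         Sanitized string safe for MQTT topics.
--
--     Example:
--         >>> sanitize_topic("My PC Name")
--         'my_pc_name'
--         >>> sanitize_topic("Test/Device")
--         'test_device'
--         >>> sanitize_topic("CPU #1 Temp")
--         'cpu_1_temp'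
--     """
--     # Convert to lowercase
--     name = name.lower()
--
--     # Replace spaces with underscores
--     name = name.replace(" ", "_")
--
--     # Remove or replace problematic characters for MQTT topics
--     # MQTT wildcards and special characters: +, #, /, $, \, ?
--     for char in ["/", "+", "#", "$", "\\", "?"]:
--         name = name.replace(char, "_")
--
--     # Remove multiple consecutive underscores
--     while "__" in name:
--         name = name.replace("__", "_")
--
--     # Remove leading and trailing underscores
--     return name.strip("_")
-- ===== SOURCE B (Python) =====
-- def sanitize_topic(name: str) -> str:
--     specials = " /+#$\\?"
--     out = []
--     for ch in name.lower():
--         c = "_" if ch in specials else ch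
--         if c != "_" or not out or out[-1] != "_":
--             out.append(c)
--     return "".join(out).strip("_")
-- ===== Notes on version B (the rewrite author's own statement) =====
-- stated objective: simpler
-- what changed: A lowercases then runs seven separate replace passes plus a while-loop that repeatedly collapses double underscores until none remain; B makes a single left-to-right pass mapping spaces/special characters to underscore and skipping an underscore whenever the last emitted character was one, then strips edge underscores.
import Mathlib
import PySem

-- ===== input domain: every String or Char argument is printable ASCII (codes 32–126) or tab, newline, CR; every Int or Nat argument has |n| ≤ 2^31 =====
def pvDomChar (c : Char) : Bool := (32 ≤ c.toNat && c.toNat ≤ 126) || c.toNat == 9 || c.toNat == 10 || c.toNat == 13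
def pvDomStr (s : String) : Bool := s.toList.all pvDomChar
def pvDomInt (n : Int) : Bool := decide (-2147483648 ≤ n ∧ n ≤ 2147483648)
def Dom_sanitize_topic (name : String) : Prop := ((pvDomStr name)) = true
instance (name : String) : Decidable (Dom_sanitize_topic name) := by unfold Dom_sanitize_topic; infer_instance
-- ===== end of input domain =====

-- B replaces A's chain of .replace passes and its while-loop collapse of "__" with a single
-- left-to-right pass that skips an '_' when the last emitted character was '_'; objective: simpler.

-- ===== PORT A =====
-- Helpers for port A's while-loop: pvRep2 is one non-overlapping left-to-right pass of
-- s.replace("__", "_") (fuel-indexed like PySem.Chars.replace.go); pvReplaceUU_lt is the strict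
-- length decrease that pvCollapseA cites in its decreasing_by.

def pvRep2 : Nat → List Char → List Char
  | 0, l => l
  | _+1, [] => []
  | f+1, c :: t => if c = '_' ∧ t.head? = some '_' then '_' :: pvRep2 f t.tail else c :: pvRep2 f t

theorem pvPrefUU (c : Char) (t : List Char) :
    List.isPrefixOf ['_','_'] (c :: t) = true ↔ c = '_' ∧ t.head? = some '_' := by
  cases t <;> simp [List.isPrefixOf] <;> aesop

theorem pvGo2_eq (f : Nat) (l acc : List Char) (h : l.length ≤ f) :
    PySem.Chars.replace.go ['_','_'] ['_'] f l acc = acc.reverse ++ pvRep2 f l := by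
  induction f generalizing l acc with
  | zero =>
    have : l = [] := by cases l <;> simp_all
    subst this
    rw [PySem.Chars.replace.go]; simp [pvRep2]
  | succ f ih =>
    match l with
    | [] =>
      rw [PySem.Chars.replace.go]; simp [pvRep2]; omega
    | c :: t =>
      rw [PySem.Chars.replace.go]
      by_cases hp : c = '_' ∧ t.head? = some '_'
      · obtain ⟨rfl, hh⟩ := hp
        cases t with
        | nil => simp at hh
        | cons d t' =>
          have hd : d = '_' := by simpa using hh
          subst hd
          rw [if_pos ((pvPrefUU _ _).2 ⟨rfl, rfl⟩)]
          have e1 : List.drop ['_','_'].length ('_'::'_'::t') = t' := rfl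
          have e2 : (['_'] : List Char).reverse ++ acc = '_' :: acc := rfl
          rw [e1, e2, ih t' (('_':Char) :: acc) (by simp at h ⊢; omega)]
          simp [pvRep2]
      · rw [if_neg (by intro hc; exact hp ((pvPrefUU c t).1 hc))]
        rw [ih t (c :: acc) (by simp at h ⊢; omega)]
        simp [pvRep2, hp]

theorem pvRep2_length_le (f : Nat) (l : List Char) : (pvRep2 f l).length ≤ l.length := by
  induction f generalizing l with
  | zero => simp [pvRep2]
  | succ f ih =>
    match l with
    | [] => simp [pvRep2]
    | c :: t =>
      by_cases hp : c = '_' ∧ t.head? = some '_'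
      · obtain ⟨rfl, hh⟩ := hp
        cases t with
        | nil => simp at hh
        | cons d t' =>
          simp [pvRep2, hh]
          have := ih t'
          omega
      · simp only [pvRep2, if_neg hp, List.length_cons]
        have := ih t
        omega

theorem pvRep2_length_lt (f : Nat) (l : List Char) (h : l.length ≤ f)
    (hin : ['_','_'] <:+: l) : (pvRep2 f l).length < l.length := by
  induction f generalizing l with
  | zero =>
    have : l = [] := by cases l <;> simp_all
    subst this; simp at hin
  | succ f ih =>
    match l with
    | [] => simp at hin
    | c :: t =>
      by_cases hp : c = '_' ∧ t.head? = some '_'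
      · obtain ⟨rfl, hh⟩ := hp
        cases t with
        | nil => simp at hh
        | cons d t' =>
          simp [pvRep2, hh]
          have := pvRep2_length_le f t'
          omega
      · simp only [pvRep2, if_neg hp, List.length_cons]
        rcases List.infix_cons_iff.1 hin with hpre | hinf
        · exact absurd ((pvPrefUU c t).1 (List.isPrefixOf_iff_prefix.2 hpre)) hp
        · have := ih t (by simp at h ⊢; omega) hinf
          omega

theorem pvReplaceUU_lt (l : List Char) (h : PySem.Chars.isIn ['_','_'] l = true) :
    (PySem.Chars.replace l ['_','_'] ['_']).length < l.length := by
  rw [PySem.Chars.replace.eq_def]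
  simp only [List.isEmpty]
  rw [pvGo2_eq l.length l [] (le_refl _)]
  simpa using pvRep2_length_lt l.length l (le_refl _) ((PySem.Chars.isIn_iff_infix _ _).1 h)

-- the 'while "__" in name: name = name.replace("__", "_")' loop of A
def pvCollapseA (s : String) : String :=
  if PySem.Str.isIn "__" s = true then pvCollapseA (PySem.Str.replace s "__" "_") else s
termination_by s.toList.length
decreasing_by
  rename_i h
  have h2 : (PySem.Str.replace s "__" "_").toList = PySem.Chars.replace s.toList ['_','_'] ['_'] :=
    PySem.Str.toList_replace s "__" "_"
  rw [h2]
  exact pvReplaceUU_lt s.toList h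

def sanitize_topic (name : String) : String :=
  let n1 := PySem.Str.lower name
  let n2 := PySem.Str.replace n1 " " "_"
  let n3 := ["/", "+", "#", "$", "\\", "?"].foldl (fun n c => PySem.Str.replace n c "_") n2
  PySem.Str.stripChars (pvCollapseA n3) "_"

-- ===== PORT B =====
def pvSpecials : List Char := " /+#$\\?".toList
def pvM (c : Char) : Char := if pvSpecials.contains c then '_' else c

-- one loop iteration of B; out is kept in reverse order, so Python's out[-1] is out.head?
def pvStepB (out : List Char) (ch : Char) : List Char :=
  let c := pvM ch
  if (c != '_') || out.isEmpty || (out.head? != some '_') then c :: out else out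

def sanitize_topic_alt (name : String) : String :=
  let outR := (PySem.Str.lower name).toList.foldl pvStepB []
  PySem.Str.stripChars (String.ofList outR.reverse) "_"

-- ===== PRECONDITION & SPEC =====
def Spec_sanitize_topic (name : String) (out : String) : Prop := out = sanitize_topic_alt name
instance (name : String) (out : String) : Decidable (Spec_sanitize_topic name out) := by unfold Spec_sanitize_topic; infer_instance

-- ===== CLAIM (what is proved, stated in full; the proofs are below) =====
def Claim_equal_sanitize_topic : Prop := ∀ (name : String), Dom_sanitize_topic name → Spec_sanitize_topic name (sanitize_topic name)

-- ===== LEMMAS AND PROOFS =====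

-- pvSq is the fully collapsed string (runs of '_' merged), tracking the last emitted character.

def pvSq (last : Option Char) : List Char → List Char
  | [] => []
  | c :: t => if c = '_' ∧ last = some '_' then pvSq last t else c :: pvSq (some c) t

theorem pvSq_rep2 (f : Nat) (l : List Char) (last : Option Char) (h : l.length ≤ f) :
    pvSq last (pvRep2 f l) = pvSq last l := by
  induction f generalizing l last with
  | zero =>
    have : l = [] := by cases l <;> simp_all
    subst this; simp [pvRep2]
  | succ f ih =>
    match l with
    | [] => simp [pvRep2]
    | c :: t =>
      by_cases hp : c = '_' ∧ t.head? = some '_'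
      · obtain ⟨rfl, hh⟩ := hp
        cases t with
        | nil => simp at hh
        | cons d t' =>
          have hd : d = '_' := by simpa using hh
          subst hd
          have ht' : t'.length ≤ f := by simp at h; omega
          by_cases hl : last = some '_'
          · simp [pvRep2, pvSq, hl, ih t' (some '_') ht']
          · simp [pvRep2, pvSq, hl, ih t' (some '_') ht']
      · have ht : t.length ≤ f := by simp at h; omega
        by_cases hl : c = '_' ∧ last = some '_'
        · obtain ⟨rfl, hl⟩ := hl
          have hph : t.head? ≠ some '_' := fun hh => hp ⟨rfl, hh⟩
          simp [pvRep2, pvSq, hl, hph, ih t (some '_') ht]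
        · simp only [pvRep2, if_neg hp]
          simp [pvSq, hl, ih t (some c) ht]

theorem pvSq_of_no_uu (l : List Char) (last : Option Char) (hin : ¬ ['_','_'] <:+: l)
    (hl : last = some '_' → l.head? ≠ some '_') : pvSq last l = l := by
  induction l generalizing last with
  | nil => simp [pvSq]
  | cons c t ih =>
    have hc : ¬ (c = '_' ∧ last = some '_') := by
      rintro ⟨rfl, hlast⟩
      exact (hl hlast) (by simp)
    rw [pvSq, if_neg hc]
    have hnt : ¬ ['_','_'] <:+: t := fun hi => hin (List.infix_cons_iff.2 (Or.inr hi))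
    rw [ih (some c) hnt]
    intro hcu hht
    have : c = '_' := by simpa using hcu
    subst this
    cases t with
    | nil => simp at hht
    | cons d t' =>
      have : d = '_' := by simpa using hht
      subst this
      exact hin (List.infix_cons_iff.2 (Or.inl (by simp)))

theorem pvCollapseA_toList (s : String) : (pvCollapseA s).toList = pvSq none s.toList := by
  rw [pvCollapseA]
  by_cases h : PySem.Str.isIn "__" s = true
  · rw [if_pos h]
    have hlt : (PySem.Str.replace s "__" "_").toList.length < s.toList.length := by
      rw [PySem.Str.toList_replace]; exact pvReplaceUU_lt s.toList h
    rw [pvCollapseA_toList (PySem.Str.replace s "__" "_")]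
    rw [PySem.Str.toList_replace]
    have e2 : ("__" : String).toList = ['_','_'] := by decide
    have e1 : ("_" : String).toList = ['_'] := by decide
    rw [e2, e1]
    have : PySem.Chars.replace s.toList ['_','_'] ['_'] = pvRep2 s.toList.length s.toList := by
      rw [PySem.Chars.replace.eq_def]
      simp only [List.isEmpty]
      simpa using pvGo2_eq s.toList.length s.toList [] (le_refl _)
    rw [this, pvSq_rep2 _ _ _ (le_refl _)]
  · rw [if_neg h]
    have : ¬ ['_','_'] <:+: s.toList := by
      intro hi
      exact h ((PySem.Chars.isIn_iff_infix _ _).2 hi)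
    rw [pvSq_of_no_uu _ _ this (by simp)]
termination_by s.toList.length
decreasing_by
  rw [PySem.Str.toList_replace]; exact pvReplaceUU_lt s.toList h

theorem pvGo1_eq (a b : Char) (f : Nat) (l acc : List Char) (h : l.length ≤ f) :
    PySem.Chars.replace.go [a] [b] f l acc =
      acc.reverse ++ l.map (fun c => if c = a then b else c) := by
  induction f generalizing l acc with
  | zero =>
    have : l = [] := by cases l <;> simp_all
    subst this
    rw [PySem.Chars.replace.go]; simp
  | succ f ih =>
    match l with
    | [] => rw [PySem.Chars.replace.go]; simp; omega
    | c :: t =>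
      have ht : t.length ≤ f := by simp at h; omega
      rw [PySem.Chars.replace.go]
      by_cases hc : c = a
      · subst hc
        rw [if_pos (by simp [List.isPrefixOf])]
        have e1 : List.drop [c].length (c :: t) = t := rfl
        have e2 : ([b] : List Char).reverse ++ acc = b :: acc := rfl
        rw [e1, e2, ih t (b :: acc) ht]
        simp
      · rw [if_neg (by simp [List.isPrefixOf]; exact fun hh => hc (by simpa using hh.symm))]
        rw [ih t (c :: acc) ht]
        simp [hc]

theorem pvReplace1 (a b : Char) (l : List Char) :
    PySem.Chars.replace l [a] [b] = l.map (fun c => if c = a then b else c) := by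
  rw [PySem.Chars.replace.eq_def]
  simp only [List.isEmpty]
  simpa using pvGo1_eq a b l.length l [] (le_refl _)

def pvF (a : Char) (c : Char) : Char := if c = a then '_' else c

theorem pvChain (c : Char) :
    pvF '?' (pvF '\\' (pvF '$' (pvF '#' (pvF '+' (pvF '/' (pvF ' ' c)))))) = pvM c := by
  by_cases h : pvSpecials.contains c
  · have : c = ' ' ∨ c = '/' ∨ c = '+' ∨ c = '#' ∨ c = '$' ∨ c = '\\' ∨ c = '?' := by
      have := h; simp [pvSpecials] at this; tauto
    rcases this with rfl|rfl|rfl|rfl|rfl|rfl|rfl <;> simp [pvF, pvM, pvSpecials]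
  · have h' : ¬(c = ' ') ∧ ¬(c = '/') ∧ ¬(c = '+') ∧ ¬(c = '#') ∧ ¬(c = '$') ∧ ¬(c = '\\') ∧ ¬(c = '?') := by
      simp [pvSpecials] at h; tauto
    obtain ⟨h1,h2,h3,h4,h5,h6,h7⟩ := h'
    simp [pvF, pvM, pvSpecials, h1,h2,h3,h4,h5,h6,h7]

theorem pvFoldB (L : List Char) (acc : List Char) :
    L.foldl pvStepB acc = (pvSq acc.head? (L.map pvM)).reverse ++ acc := by
  induction L generalizing acc with
  | nil => simp [pvSq]
  | cons ch t ih =>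
    simp only [List.foldl_cons, List.map_cons]
    by_cases hc : pvM ch = '_' ∧ acc.head? = some '_'
    · have hstep : pvStepB acc ch = acc := by
        obtain ⟨h1, h2⟩ := hc
        have hne : ¬ acc.isEmpty := by cases acc <;> simp_all
        simp [pvStepB, h1, h2, hne]
      rw [hstep, ih acc, pvSq, if_pos hc]
    · have hstep : pvStepB acc ch = pvM ch :: acc := by
        by_cases h1 : pvM ch = '_'
        · have h2 : acc.head? ≠ some '_' := fun hh => hc ⟨h1, hh⟩
          simp [pvStepB, h1, h2]
        · simp [pvStepB, h1]
      rw [hstep, ih (pvM ch :: acc), pvSq, if_neg hc]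
      simp

theorem pvReplace1Lit (a : Char) (t s : String) (h : t.toList = [a]) :
    (PySem.Str.replace s t "_").toList = s.toList.map (pvF a) := by
  rw [PySem.Str.toList_replace, h]
  rw [show ("_" : String).toList = ['_'] from by decide, pvReplace1]
  rfl

theorem pvStrip_congr (s t c : String) (h : s.toList = t.toList) :
    PySem.Str.stripChars s c = PySem.Str.stripChars t c := by
  simp only [PySem.Str.stripChars, h]

set_option maxHeartbeats 1000000 in
theorem pvMain (name : String) : sanitize_topic name = sanitize_topic_alt name := by
  unfold sanitize_topic sanitize_topic_alt
  simp only [List.foldl_cons, List.foldl_nil]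
  apply pvStrip_congr
  rw [pvCollapseA_toList, String.toList_ofList]
  rw [pvFoldB]
  simp only [List.head?_nil, List.append_nil, List.reverse_reverse]
  refine congrArg (pvSq none) ?_
  rw [pvReplace1Lit '?' "?" _ (by decide), pvReplace1Lit '\\' "\\" _ (by decide),
      pvReplace1Lit '$' "$" _ (by decide), pvReplace1Lit '#' "#" _ (by decide),
      pvReplace1Lit '+' "+" _ (by decide), pvReplace1Lit '/' "/" _ (by decide),
      pvReplace1Lit ' ' " " _ (by decide)]
  simp only [List.map_map]
  apply List.map_congr_left
  intro c _
  simp only [Function.comp_apply]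
  exact pvChain c

-- ===== VERDICT (by name: the statement is the Claim_ definition above) =====
theorem sanitize_topic_spec : Claim_equal_sanitize_topic := by
  intro name _
  exact pvMain name
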